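-- pv_equiv track=rewrite | github.com/jingyu-cai/roomba | scripts/action_states/generate_action_states.py | generate_action_matrix
-- ===== SOURCE A (Python) =====
-- def is_single_difference(state_1, state_2):
--     """ A helper function to check if there is exactly 1 difference between 2
--     states, and is used in generate_action_matrix to invalidate state transitions
--     that have more than 1 difference """
--
--     diff_counter = 0
--
--     for i in range(len(state_1)):
--         if state_1[i] != state_2[i]:
--             diff_counter += 1
--
--     return diff_counter == 1
--
-- def find_state_difference(state_1, state_2):
--     """ A helper function that finds the index of difference between two states,
--     which can be mapped onto the actions matrix; this assumes that there is
--     indeed exactly 1 difference between the two """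
--
--     index_tracker = 0
--
--     for i in range(len(state_1)):
--         if state_1[i] != state_2[i]:
--             index_tracker = i
--
--     return index_tracker
--
-- def generate_action_matrix(states):
--     """ This generates the action matrix based on states and actions """
--
--     action_matrix = []
--
--     for i in range(len(states)):
--
--         action_matrix_row = []
--
--         for j in range(len(states)):
--
--             # You cannot transition between the same state
--             if i == j:
--                 action_matrix_row.append(-1)
--
--             # You cannot transition between two states that have more than
--             #   one difference
--             elif not is_single_difference(states[i], states[j]):
--                 action_matrix_row.append(-1)
--
--             # Use actions to find the index to transition the state if there's
--             #   exactly one difference between the two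
--             else:
--                 state_index = find_state_difference(states[i], states[j])
--
--                 # Check if the transition is forward from first state to the second;
--                 #   forward means that you can only move an object from the origin
--                 #   to a bin, but not the reverse
--                 if states[i][state_index] < states[j][state_index]:
--                     action_matrix_row.append(state_index - 1)
--                 else:
--                     action_matrix_row.append(-1)
--
--         action_matrix.append(action_matrix_row)
--
--     return action_matrix
-- ===== SOURCE B (Python) =====
-- def _diff(ka, kb):
--     """ Single scan over a pair of equal-length states: returns the unique
--     differing position, -1 if the states are equal, -2 (bailing out early)
--     as soon as a second difference is seen. """
--     diff = -1
--     for p, (x, y) in enumerate(zip(ka, kb)):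
--         if x != y:
--             if diff >= 0:
--                 return -2
--             diff = p
--     return diff
--
-- def generate_action_matrix(states):
--     """ Group indices of equal states, find the single-difference position per
--     pair of distinct states with one early-exit scan, and block-fill a default
--     -1 matrix from the groups. """
--     n = len(states)
--     groups = {}
--     for idx in range(n):
--         groups.setdefault(tuple(states[idx]), []).append(idx)
--     keys = list(groups)
--     matrix = [[-1] * n for _ in range(n)]
--     for ka in keys:
--         ia = groups[ka]
--         for kb in keys:
--             d = _diff(ka, kb)
--             if d >= 0 and ka[d] < kb[d]:
--                 v = d - 1
--                 jb = groups[kb]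
--                 for i in ia:
--                     for j in jb:
--                         matrix[i][j] = v
--     return matrix
-- ===== Notes on version B (the rewrite author's own statement) =====
-- stated objective: faster
-- what changed: B groups indices of equal states with a dict so each distinct state pair is compared once, replaces A's three full scans per pair (count differences, locate the difference, compare) by one early-exit scan that stops at the second difference, and block-fills a default -1 matrix per group pair.
import Mathlib
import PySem

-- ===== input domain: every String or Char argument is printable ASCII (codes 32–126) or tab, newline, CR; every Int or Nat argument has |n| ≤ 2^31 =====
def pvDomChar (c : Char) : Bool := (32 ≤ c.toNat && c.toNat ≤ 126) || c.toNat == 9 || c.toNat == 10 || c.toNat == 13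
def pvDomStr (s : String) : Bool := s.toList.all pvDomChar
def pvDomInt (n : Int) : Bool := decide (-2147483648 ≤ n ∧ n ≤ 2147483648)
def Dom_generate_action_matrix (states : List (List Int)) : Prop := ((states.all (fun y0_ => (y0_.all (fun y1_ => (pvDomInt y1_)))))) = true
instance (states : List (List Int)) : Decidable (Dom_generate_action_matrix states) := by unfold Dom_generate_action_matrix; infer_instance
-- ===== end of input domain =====

-- B groups indices of equal states with a dict, compares each pair of distinct states once with a
-- single early-exit difference scan (A does three full scans per index pair), and block-fills a
-- default -1 matrix per group pair (measured faster in a timing run).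

-- ===== PORT A =====
-- pyGetD is exact here because Pre_ restricts to states of equal length (Python raises IndexError otherwise)
def is_single_difference (state_1 state_2 : List Int) : Bool :=
  let diff_counter : Int :=
    (PySem.List.pyRange 0 (PySem.List.len state_1) 1).foldl
      (fun dc i =>
        if PySem.List.pyGetD state_1 i 0 ≠ PySem.List.pyGetD state_2 i 0 then dc + 1 else dc) 0
  diff_counter == 1

def find_state_difference (state_1 state_2 : List Int) : Int :=
  (PySem.List.pyRange 0 (PySem.List.len state_1) 1).foldl
    (fun t i =>
      if PySem.List.pyGetD state_1 i 0 ≠ PySem.List.pyGetD state_2 i 0 then i else t) 0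

def generate_action_matrix (states : List (List Int)) : List (List Int) :=
  (PySem.List.pyRange 0 (PySem.List.len states) 1).foldl (fun action_matrix i =>
    let row :=
      (PySem.List.pyRange 0 (PySem.List.len states) 1).foldl (fun row j =>
        if i == j then row ++ [(-1 : Int)]
        else if ! is_single_difference (PySem.List.pyGetD states i []) (PySem.List.pyGetD states j []) then
          row ++ [(-1 : Int)]
        else
          let state_index := find_state_difference (PySem.List.pyGetD states i []) (PySem.List.pyGetD states j [])
          if PySem.List.pyGetD (PySem.List.pyGetD states i []) state_index 0 <
             PySem.List.pyGetD (PySem.List.pyGetD states j []) state_index 0 then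
            row ++ [state_index - 1]
          else row ++ [(-1 : Int)]) []
    action_matrix ++ [row]) []

-- ===== PORT B =====
-- _diff's  'for p, (x, y) in enumerate(zip(ka, kb)): ... return -2 / break'  is ported as
-- structural recursion on the zipped list carrying the enumerate counter p (exact)
def diff_scan_go (l : List (Int × Int)) (p diff : Int) : Int :=
  match l with
  | [] => diff
  | xy :: rest =>
    if xy.1 ≠ xy.2 then
      (if diff ≥ 0 then -2 else diff_scan_go rest (p + 1) p)
    else diff_scan_go rest (p + 1) diff

def diff_scan (ka kb : List Int) : Int := diff_scan_go (List.zip ka kb) 0 (-1)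

def generate_action_matrix_alt (states : List (List Int)) : List (List Int) :=
  let n := PySem.List.len states
  -- groups.setdefault(key, []).append(idx)  ==  Dict.modify; tuple(states[idx]) is the list itself
  let groups : PySem.Dict (List Int) (List Int) :=
    (PySem.List.pyRange 0 n 1).foldl (fun d idx =>
      d.modify (PySem.List.pyGetD states idx []) [] (fun v => v ++ [idx])) PySem.Dict.empty
  let keys := groups.keys
  -- [[-1]*n for _ in range(n)]: List.replicate is exact since n = len(states) ≥ 0
  let matrix := (PySem.List.pyRange 0 n 1).map (fun _ => List.replicate n.toNat (-1 : Int))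
  keys.foldl (fun matrix ka =>
    let ia := groups.getD ka []
    keys.foldl (fun matrix kb =>
      let d := diff_scan ka kb
      if 0 ≤ d ∧ PySem.List.pyGetD ka d 0 < PySem.List.pyGetD kb d 0 then
        let jb := groups.getD kb []
        ia.foldl (fun matrix i =>
          jb.foldl (fun matrix j =>
            PySem.List.pySetD matrix i
              (PySem.List.pySetD (PySem.List.pyGetD matrix i []) j (d - 1))) matrix) matrix
      else matrix) matrix) matrix

-- ===== PRECONDITION & SPEC =====
-- Pre_ excludes exactly the inputs on which Python A raises IndexError: two states of different
-- lengths (A indexes the second state by the first state's length).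
def Pre_generate_action_matrix (states : List (List Int)) : Prop :=
  ∀ s ∈ states, ∀ t ∈ states, s.length = t.length
instance (states : List (List Int)) : Decidable (Pre_generate_action_matrix states) := by
  unfold Pre_generate_action_matrix; infer_instance

def pvWitness_generate_action_matrix : List (List Int) := [[0, 1], [1, 1], [0, 2]]

def Spec_generate_action_matrix (states : List (List Int)) (out : List (List Int)) : Prop := out = generate_action_matrix_alt states
instance (states : List (List Int)) (out : List (List Int)) : Decidable (Spec_generate_action_matrix states out) := by unfold Spec_generate_action_matrix; infer_instance

-- ===== CLAIM (what is proved, stated in full; the proofs are below) =====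
def Claim_equal_generate_action_matrix : Prop := ∀ (states : List (List Int)), Dom_generate_action_matrix states → Pre_generate_action_matrix states → Spec_generate_action_matrix states (generate_action_matrix states)

-- ===== LEMMAS AND PROOFS =====

-- proof-side abbreviations
def gst (states : List (List Int)) (i : Nat) : List Int := states.getD i []

-- indices of the differing positions, as A's loops see them
def Dlist (s t : List Int) : List Nat :=
  (List.range s.length).filter (fun q => decide (s.getD q 0 ≠ t.getD q 0))

def groupsD (states : List (List Int)) : PySem.Dict (List Int) (List Int) :=
  (List.range states.length).foldl
    (fun d idx => d.modify (gst states idx) [] (fun v => v ++ [(idx : Int)])) PySem.Dict.empty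

-- the (i, j, scan result) triples B's fill loop inspects, flattened
def Utrip (states : List (List Int)) : List (Int × Int × Int) :=
  (groupsD states).keys.flatMap (fun ka =>
    (groupsD states).keys.flatMap (fun kb =>
      ((groupsD states).getD ka []).flatMap (fun i =>
        ((groupsD states).getD kb []).map (fun j => (i, j, diff_scan ka kb)))))

def stepU (states : List (List Int)) (m : List (List Int)) (t : Int × Int × Int) : List (List Int) :=
  if 0 ≤ t.2.2 ∧ PySem.List.pyGetD (PySem.List.pyGetD states t.1 []) t.2.2 0 <
      PySem.List.pyGetD (PySem.List.pyGetD states t.2.1 []) t.2.2 0 then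
    PySem.List.pySetD m t.1 (PySem.List.pySetD (PySem.List.pyGetD m t.1 []) t.2.1 (t.2.2 - 1))
  else m

def matrix0 (states : List (List Int)) : List (List Int) :=
  (List.range states.length).map (fun _ => List.replicate states.length (-1 : Int))

def ent (m : List (List Int)) (i j : Nat) : Int := (m.getD i []).getD j 0

def HitsAt (states : List (List Int)) (t : Int × Int × Int) (i j : Nat) : Prop :=
  t.1 = (i : Int) ∧ t.2.1 = (j : Int) ∧
  (0 ≤ t.2.2 ∧ PySem.List.pyGetD (PySem.List.pyGetD states t.1 []) t.2.2 0 <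
    PySem.List.pyGetD (PySem.List.pyGetD states t.2.1 []) t.2.2 0)

def aent (states : List (List Int)) (i j : Nat) : Int :=
  if i = j then -1
  else if ! is_single_difference (gst states i) (gst states j) then -1
  else
    let k := find_state_difference (gst states i) (gst states j)
    if PySem.List.pyGetD (gst states i) k 0 < PySem.List.pyGetD (gst states j) k 0 then k - 1
    else -1

lemma A_eq (states : List (List Int)) :
    generate_action_matrix states =
      (List.range states.length).map (fun i => (List.range states.length).map (fun j => aent states i j)) := by
  simp only [generate_action_matrix, PySem.List.len_eq, PySem.List.pyRange_zero_nat,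
    List.foldl_map, PySem.List.foldl_append_singleton_eq_map, List.nil_append]
  refine List.map_congr_left (fun i hi => ?_)
  have hfun : (fun (x : List Int) (y : Nat) =>
      if ((i : Int) == (y : Int)) = true then x ++ [(-1 : Int)]
      else
        if (!is_single_difference (PySem.List.pyGetD states (i : Int) [])
              (PySem.List.pyGetD states (y : Int) [])) = true then x ++ [(-1 : Int)]
        else
          if PySem.List.pyGetD (PySem.List.pyGetD states (i : Int) [])
                (find_state_difference (PySem.List.pyGetD states (i : Int) [])
                  (PySem.List.pyGetD states (y : Int) [])) 0 <
              PySem.List.pyGetD (PySem.List.pyGetD states (y : Int) [])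
                (find_state_difference (PySem.List.pyGetD states (i : Int) [])
                  (PySem.List.pyGetD states (y : Int) [])) 0 then
            x ++ [find_state_difference (PySem.List.pyGetD states (i : Int) [])
                (PySem.List.pyGetD states (y : Int) []) - 1]
          else x ++ [(-1 : Int)]) = fun x y => x ++ [aent states i y] := by
    funext x y
    simp only [aent, gst, PySem.List.pyGetD_natCast, beq_iff_eq, Nat.cast_inj]
    split_ifs <;> rfl
  rw [hfun, PySem.List.foldl_append_singleton_eq_map, List.nil_append]

lemma mem_Dlist_iff (s t : List Int) (q : Nat) :
    q ∈ Dlist s t ↔ q < s.length ∧ s.getD q 0 ≠ t.getD q 0 := by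
  simp [Dlist, List.mem_filter, List.mem_range]

lemma Dlist_nil_iff (s t : List Int) :
    Dlist s t = [] ↔ ∀ q, q < s.length → s.getD q 0 = t.getD q 0 := by
  rw [Dlist, List.filter_eq_nil_iff]
  simp [List.mem_range]

lemma pairwise_Dlist (s t : List Int) : (Dlist s t).Pairwise (· < ·) :=
  List.Pairwise.filter _ List.pairwise_lt_range

lemma eq_singleton_of_mem_of_all {α : Type} {l : List α} {p : α}
    (h : l.Nodup) (hp : p ∈ l) (hall : ∀ q ∈ l, q = p) : l = [p] := by
  induction l with
  | nil => cases hp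
  | cons a u ih =>
    have ha : a = p := hall a (List.mem_cons_self)
    subst ha
    cases u with
    | nil => rfl
    | cons b v =>
      have hb : b = a := hall b (by simp)
      rw [List.nodup_cons] at h
      exact absurd (by simp [hb]) h.1

lemma Dlist_eq_singleton_iff (s t : List Int) (p : Nat) :
    Dlist s t = [p] ↔
      p < s.length ∧ s.getD p 0 ≠ t.getD p 0 ∧
        ∀ q, q < s.length → s.getD q 0 ≠ t.getD q 0 → q = p := by
  have hmem : ∀ q : Nat, q ∈ Dlist s t ↔ q < s.length ∧ s.getD q 0 ≠ t.getD q 0 := by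
    intro q; simp [Dlist, List.mem_filter, List.mem_range]
  constructor
  · intro h
    have hp : p ∈ Dlist s t := by rw [h]; exact List.mem_cons_self
    obtain ⟨hp1, hp2⟩ := (hmem p).1 hp
    refine ⟨hp1, hp2, fun q hq hd => ?_⟩
    have : q ∈ Dlist s t := (hmem q).2 ⟨hq, hd⟩
    rw [h] at this
    simpa using this
  · rintro ⟨hp1, hp2, huni⟩
    refine eq_singleton_of_mem_of_all (List.Nodup.filter _ List.nodup_range)
      ((hmem p).2 ⟨hp1, hp2⟩) (fun q hq => ?_)
    obtain ⟨h1, h2⟩ := (hmem q).1 hq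
    exact huni q h1 h2

lemma isd_eq (s t : List Int) : is_single_difference s t = decide ((Dlist s t).length = 1) := by
  unfold is_single_difference
  simp only [PySem.List.len_eq, PySem.List.pyRange_zero_nat, List.foldl_map,
    PySem.List.pyGetD_natCast]
  have hfun : (fun (dc : Int) (k : Nat) => if s.getD k 0 ≠ t.getD k 0 then dc + 1 else dc)
      = fun dc k => if (fun q => decide (s.getD q 0 ≠ t.getD q 0)) k = true then dc + 1 else dc := by
    funext dc k
    split_ifs with h1 h2 <;> simp_all
  rw [hfun, PySem.List.foldl_count_if, List.countP_eq_length_filter]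
  rw [Bool.eq_iff_iff]
  simp [Dlist, Nat.cast_eq_one]

lemma foldl_pick_of_filter_nil {α β : Type} (l : List α) (d : α → Bool) (f : α → β) (a0 : β)
    (h : l.filter d = []) : l.foldl (fun a q => if d q = true then f q else a) a0 = a0 := by
  induction l generalizing a0 with
  | nil => rfl
  | cons x u ih =>
    by_cases hx : d x = true
    · simp [hx] at h
    · simp only [List.filter_cons, hx] at h
      simp only [List.foldl_cons, if_neg hx]
      exact ih a0 (by simpa using h)

lemma foldl_pick_of_filter_singleton {α β : Type} (l : List α) (d : α → Bool) (f : α → β)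
    (a0 : β) (p : α) (h : l.filter d = [p]) :
    l.foldl (fun a q => if d q = true then f q else a) a0 = f p := by
  induction l generalizing a0 with
  | nil => simp at h
  | cons x u ih =>
    by_cases hx : d x = true
    · rw [List.filter_cons_of_pos hx] at h
      obtain ⟨hxp, hu⟩ := List.cons_eq_cons.1 h
      subst hxp
      simp only [List.foldl_cons, if_pos hx]
      exact foldl_pick_of_filter_nil u d f (f x) hu
    · rw [List.filter_cons_of_neg hx] at h
      simp only [List.foldl_cons, if_neg hx]
      exact ih a0 h

lemma find_eq (s t : List Int) (p : Nat) (h : Dlist s t = [p]) :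
    find_state_difference s t = (p : Int) := by
  unfold find_state_difference
  simp only [PySem.List.len_eq, PySem.List.pyRange_zero_nat, List.foldl_map,
    PySem.List.pyGetD_natCast]
  have hfun : (fun (tr : Int) (k : Nat) => if s.getD k 0 ≠ t.getD k 0 then (k : Int) else tr)
      = fun a q => if (fun q => decide (s.getD q 0 ≠ t.getD q 0)) q = true
          then (fun k : Nat => (k : Int)) q else a := by
    funext tr k
    split_ifs with h1 h2 <;> simp_all
  rw [hfun, foldl_pick_of_filter_singleton _ _ _ _ p h]

-- ----- the early-exit difference scan of B -----

lemma dsg_all_eq (l : List (Int × Int)) (p d : Int) (h : ∀ x ∈ l, x.1 = x.2) :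
    diff_scan_go l p d = d := by
  induction l generalizing p with
  | nil => rfl
  | cons x rest ih =>
    rw [diff_scan_go, if_neg (by simpa using h x List.mem_cons_self)]
    exact ih (p + 1) (fun y hy => h y (List.mem_cons_of_mem _ hy))

lemma dsg_neg_two (l : List (Int × Int)) (p d : Int) (hd : d ≥ 0)
    (h : ∃ x ∈ l, x.1 ≠ x.2) : diff_scan_go l p d = -2 := by
  induction l generalizing p with
  | nil => simp at h
  | cons x rest ih =>
    by_cases hx : x.1 ≠ x.2
    · rw [diff_scan_go, if_pos hx, if_pos hd]
    · obtain ⟨y, hy, hyne⟩ := h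
      have hyrest : y ∈ rest := by
        rcases List.mem_cons.1 hy with rfl | hmem
        · exact absurd hyne hx
        · exact hmem
      rw [diff_scan_go, if_neg hx]
      exact ih (p + 1) ⟨y, hyrest, hyne⟩

lemma dsg_single (l1 : List (Int × Int)) (x : Int × Int) (l2 : List (Int × Int)) (p : Int)
    (hp : 0 ≤ p) (hx : x.1 ≠ x.2) (h1 : ∀ y ∈ l1, y.1 = y.2) (h2 : ∀ y ∈ l2, y.1 = y.2) :
    diff_scan_go (l1 ++ x :: l2) p (-1) = p + l1.length := by
  induction l1 generalizing p with
  | nil =>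
    rw [List.nil_append, diff_scan_go, if_pos hx, if_neg (by omega)]
    rw [dsg_all_eq l2 (p + 1) p h2]
    simp
  | cons y l1' ih =>
    rw [List.cons_append, diff_scan_go, if_neg (by simpa using h1 y List.mem_cons_self)]
    rw [ih (p + 1) (by omega) (fun z hz => h1 z (List.mem_cons_of_mem _ hz))]
    simp
    ring

lemma dsg_two (l1 : List (Int × Int)) (x : Int × Int) (l2 : List (Int × Int)) (p : Int)
    (hp : 0 ≤ p) (hx : x.1 ≠ x.2) (h1 : ∀ y ∈ l1, y.1 = y.2) (h2 : ∃ y ∈ l2, y.1 ≠ y.2) :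
    diff_scan_go (l1 ++ x :: l2) p (-1) = -2 := by
  induction l1 generalizing p with
  | nil =>
    rw [List.nil_append, diff_scan_go, if_pos hx, if_neg (by omega)]
    exact dsg_neg_two l2 (p + 1) p (by omega) h2
  | cons y l1' ih =>
    rw [List.cons_append, diff_scan_go, if_neg (by simpa using h1 y List.mem_cons_self)]
    exact ih (p + 1) (by omega) (fun z hz => h1 z (List.mem_cons_of_mem _ hz))

lemma zip_getElem_eq (s t : List Int) (hlen : s.length = t.length) (q : Nat)
    (hq : q < (s.zip t).length) :
    (s.zip t)[q] = (s.getD q 0, t.getD q 0) := by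
  have hql : q < s.length := by simp [List.length_zip, hlen] at hq ⊢; omega
  have hqt : q < t.length := hlen ▸ hql
  rw [List.getElem_zip, List.getD_eq_getElem s 0 hql, List.getD_eq_getElem t 0 hqt]

lemma length_zip_self (s t : List Int) (hlen : s.length = t.length) :
    (s.zip t).length = s.length := by
  simp [List.length_zip, hlen]

lemma diff_scan_of_Dlist_singleton (s t : List Int) (p : Nat)
    (hlen : s.length = t.length) (hD : Dlist s t = [p]) : diff_scan s t = (p : Int) := by
  obtain ⟨hp1, hp2, huni⟩ := (Dlist_eq_singleton_iff s t p).1 hD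
  have hlz : (s.zip t).length = s.length := length_zip_self s t hlen
  have hpz : p < (s.zip t).length := by omega
  have hsplit : s.zip t = (s.zip t).take p ++ (s.zip t)[p] :: (s.zip t).drop (p + 1) := by
    rw [List.getElem_cons_drop, List.take_append_drop]
  have hagree : ∀ q, q < s.length → q ≠ p → s.getD q 0 = t.getD q 0 := by
    intro q hq hqp
    by_contra hne
    exact hqp (huni q hq hne)
  rw [diff_scan, hsplit, dsg_single _ _ _ 0 le_rfl ?hx ?h1 ?h2]
  case hx =>
    rw [zip_getElem_eq s t hlen p hpz]
    simpa using hp2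
  case h1 =>
    intro y hy
    obtain ⟨q, hq, rfl⟩ := List.mem_iff_getElem.1 hy
    have hq' : q < p := by rw [List.length_take] at hq; omega
    rw [List.getElem_take, zip_getElem_eq s t hlen q (by omega)]
    exact hagree q (by omega) (by omega)
  case h2 =>
    intro y hy
    obtain ⟨r, hr, rfl⟩ := List.mem_iff_getElem.1 hy
    have hrl : p + 1 + r < (s.zip t).length := by rw [List.length_drop] at hr; omega
    rw [List.getElem_drop, zip_getElem_eq s t hlen (p + 1 + r) hrl]
    exact hagree (p + 1 + r) (by omega) (by omega)
  · simp [List.length_take, hlz]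
    omega

lemma Dlist_of_diff_scan_nonneg (s t : List Int) (hlen : s.length = t.length)
    (h : 0 ≤ diff_scan s t) : Dlist s t = [(diff_scan s t).toNat] := by
  have hlz : (s.zip t).length = s.length := length_zip_self s t hlen
  match hD : Dlist s t with
  | [] =>
    exfalso
    have hall : ∀ x ∈ s.zip t, x.1 = x.2 := by
      intro x hx
      obtain ⟨q, hq, rfl⟩ := List.mem_iff_getElem.1 hx
      rw [zip_getElem_eq s t hlen q hq]
      exact (Dlist_nil_iff s t).1 hD q (by omega)
    rw [diff_scan, dsg_all_eq _ 0 (-1) hall] at h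
    omega
  | [p] =>
    rw [diff_scan_of_Dlist_singleton s t p hlen hD]
    simp
  | p1 :: p2 :: rest =>
    exfalso
    have hpw := pairwise_Dlist s t
    rw [hD] at hpw
    have hlt12 : p1 < p2 := (List.pairwise_cons.1 hpw).1 p2 (by simp)
    have hmin : ∀ q ∈ Dlist s t, p1 ≤ q := by
      intro q hq
      rw [hD] at hq
      rcases List.mem_cons.1 hq with rfl | hmem
      · exact le_rfl
      · exact le_of_lt ((List.pairwise_cons.1 hpw).1 q hmem)
    have hp1 := (mem_Dlist_iff s t p1).1 (by rw [hD]; simp)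
    have hp2 := (mem_Dlist_iff s t p2).1 (by rw [hD]; simp)
    have hp1z : p1 < (s.zip t).length := by omega
    have hsplit : s.zip t = (s.zip t).take p1 ++ (s.zip t)[p1] :: (s.zip t).drop (p1 + 1) := by
      rw [List.getElem_cons_drop, List.take_append_drop]
    rw [diff_scan, hsplit, dsg_two _ _ _ 0 le_rfl ?hx ?h1 ?h2] at h
    · omega
    case hx =>
      rw [zip_getElem_eq s t hlen p1 hp1z]
      simpa using hp1.2
    case h1 =>
      intro y hy
      obtain ⟨q, hq, rfl⟩ := List.mem_iff_getElem.1 hy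
      have hq' : q < p1 := by rw [List.length_take] at hq; omega
      rw [List.getElem_take, zip_getElem_eq s t hlen q (by omega)]
      by_contra hne
      have : p1 ≤ q := hmin q ((mem_Dlist_iff s t q).2 ⟨by omega, by simpa using hne⟩)
      omega
    case h2 =>
      have hidx : p2 - (p1 + 1) < (List.drop (p1 + 1) (s.zip t)).length := by
        rw [List.length_drop]; omega
      refine ⟨_, List.getElem_mem hidx, ?_⟩
      rw [List.getElem_drop, zip_getElem_eq s t hlen _ (by omega)]
      rw [show p1 + 1 + (p2 - (p1 + 1)) = p2 from by omega]
      simpa using hp2.2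

-- ----- the groups dict of B -----

lemma mem_group_iff (states : List (List Int)) (k : List Int) (z : Int) :
    z ∈ (groupsD states).getD k [] ↔
      ∃ i : Nat, i < states.length ∧ gst states i = k ∧ z = (i : Int) := by
  unfold groupsD
  rw [show (List.range states.length).foldl
        (fun d idx => d.modify (gst states idx) [] (fun v => v ++ [(idx : Int)])) PySem.Dict.empty
      = ((List.range states.length).map (fun idx => (gst states idx, (idx : Int)))).foldl
        (fun d q => d.modify q.1 [] (fun v => v ++ [q.2])) PySem.Dict.empty
    from by rw [List.foldl_map]]
  rw [PySem.Dict.getD_foldl_modify_append, PySem.Dict.getD_empty]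
  simp only [List.nil_append, List.mem_map, List.mem_filter, List.mem_range, beq_iff_eq]
  constructor
  · rintro ⟨q, ⟨⟨i, hi, rfl⟩, hk⟩, rfl⟩
    exact ⟨i, hi, hk, rfl⟩
  · rintro ⟨i, hi, hk, rfl⟩
    exact ⟨(gst states i, (i : Int)), ⟨⟨i, hi, rfl⟩, hk⟩, rfl⟩

lemma mem_keys_groups (states : List (List Int)) (k : List Int) :
    k ∈ (groupsD states).keys ↔ ∃ i : Nat, i < states.length ∧ gst states i = k := by
  unfold groupsD
  rw [PySem.Dict.keys_foldl_modify_key _ (fun idx => gst states idx) []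
    (fun _ idx => (fun v => v ++ [(idx : Int)]))]
  rw [PySem.Dict.keys_empty,
    show PySem.Set.update ([] : List (List Int))
        ((List.range states.length).map (fun idx => gst states idx))
      = PySem.Set.ofList ((List.range states.length).map (fun idx => gst states idx)) from rfl,
    PySem.Set.mem_ofList]
  simp [List.mem_map, List.mem_range]

lemma pyGetD_of_mem_group (states : List (List Int)) (k : List Int) (z : Int)
    (h : z ∈ (groupsD states).getD k []) : PySem.List.pyGetD states z [] = k := by
  obtain ⟨i, _, hk, rfl⟩ := (mem_group_iff states k z).1 h
  rw [PySem.List.pyGetD_natCast]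
  exact hk

-- ----- flattening B's fill loop -----

lemma batch_eq (states : List (List Int)) (ka kb : List Int) (m : List (List Int))
    (hia : ∀ z ∈ (groupsD states).getD ka [], PySem.List.pyGetD states z [] = ka)
    (hjb : ∀ z ∈ (groupsD states).getD kb [], PySem.List.pyGetD states z [] = kb) :
    (((groupsD states).getD ka []).flatMap (fun i =>
        ((groupsD states).getD kb []).map (fun j => (i, j, diff_scan ka kb)))).foldl
      (stepU states) m
    = (if 0 ≤ diff_scan ka kb ∧
          PySem.List.pyGetD ka (diff_scan ka kb) 0 < PySem.List.pyGetD kb (diff_scan ka kb) 0 then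
        ((groupsD states).getD ka []).foldl (fun m i =>
          ((groupsD states).getD kb []).foldl (fun m j =>
            PySem.List.pySetD m i
              (PySem.List.pySetD (PySem.List.pyGetD m i []) j (diff_scan ka kb - 1))) m) m
      else m) := by
  rw [List.foldl_flatMap]
  split_ifs with hc
  · refine PySem.List.foldl_congr_mem _ _ _ m (fun acc i hi => ?_)
    rw [List.foldl_map]
    refine PySem.List.foldl_congr_mem _ _ _ acc (fun acc2 j hj => ?_)
    show stepU states acc2 (i, j, diff_scan ka kb) = _
    unfold stepU
    rw [if_pos (by simpa [hia i hi, hjb j hj] using hc)]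
  · refine Eq.trans (PySem.List.foldl_congr_mem _ _ (fun acc _ => acc) m
      (fun acc i hi => ?_)) (List.foldl_fixed _)
    rw [List.foldl_map]
    refine Eq.trans (PySem.List.foldl_congr_mem _ _ (fun a _ => a) acc
      (fun acc2 j hj => ?_)) (List.foldl_fixed _)
    show stepU states acc2 (i, j, diff_scan ka kb) = acc2
    unfold stepU
    rw [if_neg (by simpa [hia i hi, hjb j hj] using hc)]

lemma B_eq (states : List (List Int)) :
    generate_action_matrix_alt states = (Utrip states).foldl (stepU states) (matrix0 states) := by
  unfold generate_action_matrix_alt Utrip matrix0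
  simp only [PySem.List.len_eq, PySem.List.pyRange_zero_nat, List.foldl_map, List.map_map,
    PySem.List.pyGetD_natCast, Int.toNat_natCast, Function.comp_def]
  rw [show (List.range states.length).foldl
        (fun d idx => d.modify (states.getD idx []) [] (fun v => v ++ [(idx : Int)])) PySem.Dict.empty
      = groupsD states from rfl]
  rw [List.foldl_flatMap]
  refine (PySem.List.foldl_congr_mem _ _ _ _ (fun acc ka hka => ?_)).symm
  rw [List.foldl_flatMap]
  refine PySem.List.foldl_congr_mem _ _ _ acc (fun acc2 kb hkb => ?_)
  exact batch_eq states ka kb acc2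
    (fun z hz => pyGetD_of_mem_group states ka z hz)
    (fun z hz => pyGetD_of_mem_group states kb z hz)

lemma mem_Utrip_iff (states : List (List Int)) (t : Int × Int × Int) :
    t ∈ Utrip states ↔
      ∃ i j : Nat, i < states.length ∧ j < states.length ∧
        t = ((i : Int), (j : Int), diff_scan (gst states i) (gst states j)) := by
  unfold Utrip
  simp only [List.mem_flatMap, List.mem_map]
  constructor
  · rintro ⟨ka, hka, kb, hkb, zi, hzi, zj, hzj, rfl⟩
    obtain ⟨i, hi, hki, rfl⟩ := (mem_group_iff states ka zi).1 hzi
    obtain ⟨j, hj, hkj, rfl⟩ := (mem_group_iff states kb zj).1 hzj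
    exact ⟨i, j, hi, hj, by rw [hki, hkj]⟩
  · rintro ⟨i, j, hi, hj, rfl⟩
    exact ⟨gst states i, (mem_keys_groups states _).2 ⟨i, hi, rfl⟩,
      gst states j, (mem_keys_groups states _).2 ⟨j, hj, rfl⟩,
      (i : Int), (mem_group_iff states _ _).2 ⟨i, hi, rfl, rfl⟩,
      (j : Int), (mem_group_iff states _ _).2 ⟨j, hj, rfl, rfl⟩, rfl⟩

lemma getD_set_gen {α : Type} (m : List α) (dflt : α) (a : Nat) (r : α) (i : Nat) :
    (m.set a r).getD i dflt = if a = i ∧ a < m.length then r else m.getD i dflt := by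
  by_cases h1 : a = i
  · subst h1
    by_cases h2 : a < m.length
    · rw [if_pos ⟨rfl, h2⟩, List.getD_eq_getElem?_getD, List.getElem?_set, if_pos rfl, if_pos h2]
      rfl
    · rw [if_neg (by tauto), List.getD_eq_getElem?_getD, List.getElem?_set, if_pos rfl,
        if_neg h2, List.getD_eq_getElem?_getD, List.getElem?_eq_none (by omega)]
  · rw [if_neg (by tauto), List.getD_eq_getElem?_getD, List.getElem?_set, if_neg h1,
      List.getD_eq_getElem?_getD]

lemma getD_set_row (m : List (List Int)) (a : Nat) (r : List Int) (i : Nat) :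
    (m.set a r).getD i [] = if a = i ∧ a < m.length then r else m.getD i [] :=
  getD_set_gen m [] a r i

lemma getD_set_entry (l : List Int) (b : Nat) (v : Int) (j : Nat) :
    (l.set b v).getD j 0 = if b = j ∧ b < l.length then v else l.getD j 0 :=
  getD_set_gen l 0 b v j

lemma length_stepU (states : List (List Int)) (m : List (List Int)) (t : Int × Int × Int) :
    (stepU states m t).length = m.length := by
  unfold stepU
  split_ifs
  · exact PySem.List.length_pySetD m t.1 _
  · rfl

lemma row_length_stepU (states : List (List Int)) (m : List (List Int)) (t : Int × Int × Int)
    (h0 : 0 ≤ t.1) (i : Nat) :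
    ((stepU states m t).getD i []).length = (m.getD i []).length := by
  unfold stepU
  split_ifs
  · rw [PySem.List.pySetD_of_nonneg _ _ h0, getD_set_row]
    split_ifs with hc
    · rw [PySem.List.length_pySetD, PySem.List.pyGetD_of_nonneg _ _ h0, hc.1]
    · rfl
  · rfl

lemma ent_stepU_no_hit (states : List (List Int)) (m : List (List Int)) (t : Int × Int × Int)
    (i j : Nat) (h0 : 0 ≤ t.1 ∧ 0 ≤ t.2.1) (h : ¬ HitsAt states t i j) :
    ent (stepU states m t) i j = ent m i j := by
  unfold stepU
  split_ifs with hc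
  · have hij : t.1 ≠ (i : Int) ∨ t.2.1 ≠ (j : Int) := by
      by_contra hcon
      push Not at hcon
      exact h ⟨hcon.1, hcon.2, hc⟩
    unfold ent
    rw [PySem.List.pySetD_of_nonneg _ _ h0.1, getD_set_row]
    rcases hij with h1 | h2
    · have hne : t.1.toNat ≠ i := by omega
      simp [hne]
    · split_ifs with hc2
      · rw [PySem.List.pySetD_of_nonneg _ _ h0.2, getD_set_entry]
        have hne : t.2.1.toNat ≠ j := by omega
        rw [if_neg (by simp [hne]), PySem.List.pyGetD_of_nonneg _ _ h0.1, hc2.1]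
      · rfl
  · rfl

lemma ent_stepU_hit (states : List (List Int)) (m : List (List Int)) (t : Int × Int × Int)
    (i j : Nat) (h0 : 0 ≤ t.1 ∧ 0 ≤ t.2.1) (h : HitsAt states t i j)
    (hi : i < m.length) (hj : j < (m.getD i []).length) :
    ent (stepU states m t) i j = t.2.2 - 1 := by
  obtain ⟨h1, h2, hc⟩ := h
  unfold stepU ent
  rw [if_pos hc, PySem.List.pySetD_of_nonneg _ _ h0.1, getD_set_row]
  have ha : t.1.toNat = i := by omega
  rw [if_pos ⟨ha, by omega⟩, PySem.List.pySetD_of_nonneg _ _ h0.2, getD_set_entry,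
    PySem.List.pyGetD_of_nonneg _ _ h0.1, ha]
  have hb : t.2.1.toNat = j := by omega
  rw [if_pos ⟨hb, by omega⟩]

lemma length_foldl_stepU (states : List (List Int)) (U : List (Int × Int × Int)) (m : List (List Int)) :
    (U.foldl (stepU states) m).length = m.length := by
  induction U generalizing m with
  | nil => rfl
  | cons t T ih => rw [List.foldl_cons, ih, length_stepU]

lemma row_length_foldl_stepU (states : List (List Int)) (U : List (Int × Int × Int)) (m : List (List Int))
    (hU : ∀ t ∈ U, 0 ≤ t.1) (i : Nat) :
    ((U.foldl (stepU states) m).getD i []).length = (m.getD i []).length := by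
  induction U generalizing m with
  | nil => rfl
  | cons t T ih =>
    rw [List.foldl_cons, ih _ (fun t' ht' => hU t' (List.mem_cons_of_mem _ ht')),
      row_length_stepU _ _ _ (hU t List.mem_cons_self)]

lemma ent_foldl_stepU_no_hit (states : List (List Int)) (U : List (Int × Int × Int)) (m : List (List Int))
    (i j : Nat) (hU : ∀ t ∈ U, 0 ≤ t.1 ∧ 0 ≤ t.2.1)
    (h : ∀ t ∈ U, ¬ HitsAt states t i j) :
    ent (U.foldl (stepU states) m) i j = ent m i j := by
  induction U generalizing m with
  | nil => rfl
  | cons t T ih =>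
    rw [List.foldl_cons, ih _ (fun t' ht' => hU t' (List.mem_cons_of_mem _ ht'))
      (fun t' ht' => h t' (List.mem_cons_of_mem _ ht')),
      ent_stepU_no_hit _ _ _ _ _ (hU t List.mem_cons_self) (h t List.mem_cons_self)]

lemma ent_foldl_stepU_preserve (states : List (List Int)) (U : List (Int × Int × Int)) (m : List (List Int))
    (i j : Nat) (v : Int) (hU : ∀ t ∈ U, 0 ≤ t.1 ∧ 0 ≤ t.2.1)
    (huniq : ∀ t ∈ U, HitsAt states t i j → t.2.2 = v)
    (hi : i < m.length) (hj : j < (m.getD i []).length)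
    (hm : ent m i j = v - 1) :
    ent (U.foldl (stepU states) m) i j = v - 1 := by
  induction U generalizing m with
  | nil => exact hm
  | cons t T ih =>
    have h0 := hU t List.mem_cons_self
    rw [List.foldl_cons]
    refine ih _ (fun t' ht' => hU t' (List.mem_cons_of_mem _ ht'))
      (fun t' ht' => huniq t' (List.mem_cons_of_mem _ ht'))
      (by rw [length_stepU]; exact hi)
      (by rw [row_length_stepU _ _ _ h0.1]; exact hj) ?_
    by_cases hh : HitsAt states t i j
    · rw [ent_stepU_hit _ _ _ _ _ h0 hh hi hj, huniq t List.mem_cons_self hh]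
    · rw [ent_stepU_no_hit _ _ _ _ _ h0 hh]
      exact hm

lemma ent_foldl_stepU_hit (states : List (List Int)) (U : List (Int × Int × Int)) (m : List (List Int))
    (i j : Nat) (v : Int) (hU : ∀ t ∈ U, 0 ≤ t.1 ∧ 0 ≤ t.2.1)
    (huniq : ∀ t ∈ U, HitsAt states t i j → t.2.2 = v)
    (hex : ∃ t ∈ U, HitsAt states t i j)
    (hi : i < m.length) (hj : j < (m.getD i []).length) :
    ent (U.foldl (stepU states) m) i j = v - 1 := by
  induction U generalizing m with
  | nil => simp at hex
  | cons t T ih =>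
    have h0 := hU t List.mem_cons_self
    rw [List.foldl_cons]
    by_cases hh : HitsAt states t i j
    · refine ent_foldl_stepU_preserve states T _ i j v
        (fun t' ht' => hU t' (List.mem_cons_of_mem _ ht'))
        (fun t' ht' => huniq t' (List.mem_cons_of_mem _ ht'))
        (by rw [length_stepU]; exact hi)
        (by rw [row_length_stepU _ _ _ h0.1]; exact hj) ?_
      rw [ent_stepU_hit _ _ _ _ _ h0 hh hi hj, huniq t List.mem_cons_self hh]
    · obtain ⟨t', ht', hh'⟩ := hex
      have ht'T : t' ∈ T := by
        rcases List.mem_cons.1 ht' with rfl | hmem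
        · exact absurd hh' hh
        · exact hmem
      refine ih _ (fun t' ht' => hU t' (List.mem_cons_of_mem _ ht'))
        (fun t' ht' => huniq t' (List.mem_cons_of_mem _ ht')) ⟨t', ht'T, hh'⟩
        (by rw [length_stepU]; exact hi)
        (by rw [row_length_stepU _ _ _ h0.1]; exact hj)

lemma hitsAt_cast_iff (states : List (List Int)) (ki kj : Nat) (d : Int) (i j : Nat) :
    HitsAt states ((ki : Int), (kj : Int), d) i j ↔
      ki = i ∧ kj = j ∧ (0 ≤ d ∧ PySem.List.pyGetD (gst states ki) d 0 <
        PySem.List.pyGetD (gst states kj) d 0) := by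
  unfold HitsAt gst
  simp [PySem.List.pyGetD_natCast]

lemma nonneg_Utrip (states : List (List Int)) :
    ∀ t ∈ Utrip states, 0 ≤ t.1 ∧ 0 ≤ t.2.1 := by
  intro t ht
  obtain ⟨i, j, _, _, rfl⟩ := (mem_Utrip_iff states t).1 ht
  constructor <;> positivity

lemma gst_mem (states : List (List Int)) (i : Nat) (hi : i < states.length) :
    gst states i ∈ states := by
  unfold gst
  rw [List.getD_eq_getElem _ _ hi]
  exact List.getElem_mem hi

lemma matrix0_getD (states : List (List Int)) (i : Nat) (hi : i < states.length) :
    (matrix0 states).getD i [] = List.replicate states.length (-1 : Int) := by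
  unfold matrix0
  rw [List.getD_eq_getElem _ _ (by simpa using hi)]
  simp

lemma ent_matrix0 (states : List (List Int)) (i j : Nat) (hi : i < states.length)
    (hj : j < states.length) : ent (matrix0 states) i j = -1 := by
  unfold ent
  rw [matrix0_getD states i hi, List.getD_eq_getElem _ _ (by simpa using hj)]
  simp

lemma aent_eq_ent (states : List (List Int)) (hpre : Pre_generate_action_matrix states)
    (i j : Nat) (hi : i < states.length) (hj : j < states.length) :
    aent states i j = ent ((Utrip states).foldl (stepU states) (matrix0 states)) i j := by
  have hlen : (gst states i).length = (gst states j).length :=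
    hpre _ (gst_mem states i hi) _ (gst_mem states j hj)
  have hUpos := nonneg_Utrip states
  have hi0 : i < (matrix0 states).length := by simpa [matrix0] using hi
  have hj0 : j < ((matrix0 states).getD i []).length := by
    rw [matrix0_getD states i hi]; simpa using hj
  set d := diff_scan (gst states i) (gst states j) with hd
  have ht0 : ((i : Int), (j : Int), d) ∈ Utrip states :=
    (mem_Utrip_iff states _).2 ⟨i, j, hi, hj, rfl⟩
  -- at most one position per ordered index pair: the triple is determined by (i, j)
  have huniq : ∀ t ∈ Utrip states, HitsAt states t i j → t.2.2 = d := by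
    intro t ht hh
    obtain ⟨a, b, ha, hb, rfl⟩ := (mem_Utrip_iff states t).1 ht
    obtain ⟨rfl, rfl, _⟩ := (hitsAt_cast_iff states a b _ i j).1 hh
    rfl
  by_cases hc : 0 ≤ d ∧ PySem.List.pyGetD (gst states i) d 0 < PySem.List.pyGetD (gst states j) d 0
  · have hh0 : HitsAt states ((i : Int), (j : Int), d) i j :=
      (hitsAt_cast_iff states i j d i j).2 ⟨rfl, rfl, hc⟩
    rw [ent_foldl_stepU_hit states _ _ i j d hUpos huniq ⟨_, ht0, hh0⟩ hi0 hj0]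
    have hD : Dlist (gst states i) (gst states j) = [d.toNat] :=
      Dlist_of_diff_scan_nonneg _ _ hlen (hd ▸ hc.1)
    have hdn : ((d.toNat : Nat) : Int) = d := Int.toNat_of_nonneg hc.1
    have hij : i ≠ j := by
      intro e
      have := hc.2
      rw [e] at this
      exact absurd this (lt_irrefl _)
    have hfind : find_state_difference (gst states i) (gst states j) = d := by
      rw [find_eq _ _ d.toNat hD, hdn]
    simp only [aent, hij, if_false, isd_eq, hD]
    simp only [List.length_cons, List.length_nil, decide_true, Bool.not_true, if_false,
      Bool.false_eq_true, hfind]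
    rw [if_pos hc.2]
  · rw [ent_foldl_stepU_no_hit states _ _ i j hUpos ?nohit, ent_matrix0 states i j hi hj]
    case nohit =>
      intro t ht hh
      obtain ⟨a, b, ha, hb, rfl⟩ := (mem_Utrip_iff states t).1 ht
      obtain ⟨rfl, rfl, hcc⟩ := (hitsAt_cast_iff states a b _ i j).1 hh
      exact hc hcc
    unfold aent
    by_cases hij : i = j
    · rw [if_pos hij]
    · rw [if_neg hij]
      by_cases hone : (Dlist (gst states i) (gst states j)).length = 1
      · obtain ⟨p, hD⟩ := List.length_eq_one_iff.1 hone
        have hscan : d = (p : Int) := hd ▸ diff_scan_of_Dlist_singleton _ _ p hlen hD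
        have hnlt : ¬ (PySem.List.pyGetD (gst states i) ((p : Nat) : Int) 0 <
            PySem.List.pyGetD (gst states j) ((p : Nat) : Int) 0) := by
          intro hlt
          exact hc ⟨by rw [hscan]; positivity, by rw [hscan]; exact hlt⟩
        rw [isd_eq, hD]
        simp only [List.length_cons, List.length_nil, decide_true, Bool.not_true,
          Bool.false_eq_true]
        rw [if_neg (by simp), find_eq _ _ p hD, if_neg hnlt]
      · rw [isd_eq, if_pos (by simp [hone])]

-- ===== VERDICT (by name: the statement is the Claim_ definition above) =====
theorem generate_action_matrix_spec : Claim_equal_generate_action_matrix := by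
  unfold Claim_equal_generate_action_matrix
  intro states _ hpre
  unfold Spec_generate_action_matrix
  rw [A_eq, B_eq]
  have hUpos1 : ∀ t ∈ Utrip states, 0 ≤ t.1 := fun t ht => (nonneg_Utrip states t ht).1
  have hlenB : ((Utrip states).foldl (stepU states) (matrix0 states)).length = states.length := by
    rw [length_foldl_stepU]; simp [matrix0]
  apply List.ext_getElem (by simpa using hlenB.symm)
  intro i h1 h2
  have hi : i < states.length := by simpa using h1
  have hrowB : (((Utrip states).foldl (stepU states) (matrix0 states)).getD i []).length
      = states.length := by
    rw [row_length_foldl_stepU states _ _ hUpos1, matrix0_getD states i hi]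
    simp
  refine List.ext_getElem ?_ ?_
  · simp only [List.getElem_map, List.length_map, List.length_range]
    rw [← List.getD_eq_getElem _ [] h2, hrowB]
  · intro j hj1 hj2
    have hj : j < states.length := by simpa using hj1
    have hAij : ((List.range states.length).map
        (fun i => (List.range states.length).map (fun j => aent states i j)))[i][j]'(by
          simpa using hj1) = aent states i j := by
      simp
    have hent : ent ((Utrip states).foldl (stepU states) (matrix0 states)) i j
        = ((Utrip states).foldl (stepU states) (matrix0 states))[i][j]'hj2 := by
      unfold ent
      rw [List.getD_eq_getElem _ [] h2, List.getD_eq_getElem _ 0 hj2]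
    rw [hAij, ← hent]
    exact aent_eq_ent states hpre i j hi hj
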